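-- pv_equiv track=rewrite | github.com/ngocuong0105/usaco | silver/diamond.py | solve
-- ===== SOURCE A (Python) =====
-- from itertools import accumulate
-- from typing import Any
--
-- def solve(inp) -> Any:
--     nums, K = inp
--     nums.sort()
--     l,j = [0]*len(nums),0
--     for i in range(len(nums)):
--         while j<len(nums) and nums[j]-nums[i] <= K:
--             j += 1
--         j -= 1
--         l[i] = j-i+1
--     r,i = [0]*len(nums),len(nums)-1
--     for j in range(len(nums)-1,-1,-1):
--         while i >= 0 and nums[j] - nums[i] <= K:
--             i -= 1
--         i += 1
--         r[j] = j-i+1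
--     l = list(accumulate(l[::-1],max))[::-1]
--     r = list(accumulate(r,max))
--     res = 0
--     for i in range(len(l)-1):
--         res = max(res,l[i+1]+r[i])
--     return res
-- ===== SOURCE B (Python) =====
-- def _bisect_right(a, x):
--     lo, hi = 0, len(a)
--     while lo < hi:
--         mid = (lo + hi) // 2
--         if x < a[mid]:
--             hi = mid
--         else:
--             lo = mid + 1
--     return lo
--
--
-- def _bisect_left(a, x):
--     lo, hi = 0, len(a)
--     while lo < hi:
--         mid = (lo + hi) // 2
--         if a[mid] < x:
--             lo = mid + 1
--         else:
--             hi = mid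
--     return lo
--
--
-- def solve(inp):
--     # Sorts nums in place (same observable mutation as the original).
--     nums, K = inp
--     nums.sort()
--     n = len(nums)
--     # prefR[j] = best size of a window ending at an index <= j, by binary search
--     prefR = []
--     best = 0
--     for j in range(n):
--         best = max(best, j - _bisect_left(nums, nums[j] - K) + 1)
--         prefR.append(best)
--     # sweep i downward keeping the best window starting at an index >= i
--     res = 0
--     bestL = 0
--     for i in range(n - 1, 0, -1):
--         bestL = max(bestL, _bisect_right(nums, nums[i] + K) - i)
--         res = max(res, bestL + prefR[i - 1])
--     return res
-- ===== Notes on version B (the rewrite author's own statement) =====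
-- stated objective: alternative
-- what changed: Replaces A's two stateful two-pointer sweeps and its accumulate-built suffix/prefix-max arrays by direct binary searches (hand-rolled CPython-style bisect_left/bisect_right) combined with running maxima in two passes.
import Mathlib
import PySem

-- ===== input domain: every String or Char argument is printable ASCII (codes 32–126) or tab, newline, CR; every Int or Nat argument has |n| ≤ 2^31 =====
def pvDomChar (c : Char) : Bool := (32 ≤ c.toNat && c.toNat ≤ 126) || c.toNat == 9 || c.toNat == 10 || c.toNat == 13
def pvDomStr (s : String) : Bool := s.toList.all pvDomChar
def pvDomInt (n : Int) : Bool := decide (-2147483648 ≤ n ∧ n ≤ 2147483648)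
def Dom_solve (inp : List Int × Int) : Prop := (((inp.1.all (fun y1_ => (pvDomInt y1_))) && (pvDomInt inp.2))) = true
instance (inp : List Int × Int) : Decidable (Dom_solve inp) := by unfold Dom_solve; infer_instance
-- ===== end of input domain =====

-- B replaces A's two stateful two-pointer sweeps and accumulate-built max arrays by binary
-- searches with running maxima (objective: alternative, same O(n log n) cost).
-- Both A and B sort nums in place; the equivalence proved here is about the return value.

-- ===== PORT A =====
-- while j<len(nums) and nums[j]-nums[i] <= K: j += 1   (xi = nums[i])
def solveWhileJ (s : List Int) (xi K : Int) (j : Int) : Int :=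
  if h : j < (s.length : Int) ∧ PySem.List.pyGetD s j 0 - xi ≤ K then
    solveWhileJ s xi K (j + 1)
  else j
termination_by ((s.length : Int) - j).toNat
decreasing_by omega

-- while i >= 0 and nums[j] - nums[i] <= K: i -= 1   (xj = nums[j])
def solveWhileI (s : List Int) (xj K : Int) (i : Int) : Int :=
  if h : 0 ≤ i ∧ xj - PySem.List.pyGetD s i 0 ≤ K then
    solveWhileI s xj K (i - 1)
  else i
termination_by (i + 1).toNat
decreasing_by omega

-- itertools.accumulate(xs, max): running maxima
def solveAccMaxGo (c : Int) : List Int → List Int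
  | [] => []
  | y :: ys => (max c y) :: solveAccMaxGo (max c y) ys

def solveAccMax : List Int → List Int
  | [] => []
  | x :: xs => x :: solveAccMaxGo x xs

def solve (inp : List Int × Int) : Int :=
  let K := inp.2
  let nums := PySem.List.sorted inp.1 (fun y => y)   -- nums.sort() (in-place; return value only)
  let n := nums.length
  let lj := (PySem.List.pyRange 0 (n : Int) 1).foldl (fun (st : List Int × Int) i =>
      let j := solveWhileJ nums (PySem.List.pyGetD nums i 0) K st.2 - 1
      (PySem.List.pySetD st.1 i (j - i + 1), j)) (List.replicate n (0 : Int), 0)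
  let ri := (PySem.List.pyRange ((n : Int) - 1) (-1) (-1)).foldl (fun (st : List Int × Int) j =>
      let i := solveWhileI nums (PySem.List.pyGetD nums j 0) K st.2 + 1
      (PySem.List.pySetD st.1 j (j - i + 1), i)) (List.replicate n (0 : Int), (n : Int) - 1)
  let l2 := (solveAccMax lj.1.reverse).reverse       -- l[::-1] is exactly List.reverse
  let r2 := solveAccMax ri.1
  (PySem.List.pyRange 0 ((l2.length : Int) - 1) 1).foldl
    (fun res i => max res (PySem.List.pyGetD l2 (i + 1) 0 + PySem.List.pyGetD r2 i 0)) 0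

-- ===== PORT B =====
-- _bisect_right/_bisect_left in Source B are CPython's bisect loops = PySem.List.bisectRight/bisectLeft
def solve_alt (inp : List Int × Int) : Int :=
  let K := inp.2
  let nums := PySem.List.sorted inp.1 (fun y => y)   -- nums.sort() (in-place; return value only)
  let n := nums.length
  let pr := (PySem.List.pyRange 0 (n : Int) 1).foldl (fun (st : List Int × Int) j =>
      let best := max st.2 (j - (PySem.List.bisectLeft nums (PySem.List.pyGetD nums j 0 - K) : Int) + 1)
      (st.1 ++ [best], best)) ([], 0)
  let rb := (PySem.List.pyRange ((n : Int) - 1) 0 (-1)).foldl (fun (st : Int × Int) i =>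
      let bestL := max st.2 ((PySem.List.bisectRight nums (PySem.List.pyGetD nums i 0 + K) : Int) - i)
      (max st.1 (bestL + PySem.List.pyGetD pr.1 (i - 1) 0), bestL)) (0, 0)
  rb.1

-- ===== PRECONDITION & SPEC =====
-- Pre_ excludes exactly the inputs where A raises IndexError: K < 0 with at least two
-- elements drives A's second two-pointer index i past the end of the list.
def Pre_solve (inp : List Int × Int) : Prop := 0 ≤ inp.2 ∨ inp.1.length < 2
instance (inp : List Int × Int) : Decidable (Pre_solve inp) := by unfold Pre_solve; infer_instance

def pvWitness_solve : (List Int × Int) := ([3, 1, 7, 2], 4)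

def Spec_solve (inp : List Int × Int) (out : Int) : Prop := out = solve_alt inp
instance (inp : List Int × Int) (out : Int) : Decidable (Spec_solve inp out) := by unfold Spec_solve; infer_instance

-- ===== CLAIM (what is proved, stated in full; the proofs are below) =====
def Claim_equal_solve : Prop := ∀ (inp : List Int × Int), Dom_solve inp → Pre_solve inp → Spec_solve inp (solve inp)

-- ===== LEMMAS AND PROOFS =====

-- spec-layer window sizes on the sorted list s
def cntR (s : List Int) (K : Int) (k : Nat) : Nat := PySem.List.bisectRight s (s.getD k 0 + K)
def cntL (s : List Int) (K : Int) (k : Nat) : Nat := PySem.List.bisectLeft s (s.getD k 0 - K)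
def fA (s : List Int) (K : Int) (k : Nat) : Int := (cntR s K k : Int) - k
def gA (s : List Int) (K : Int) (k : Nat) : Int := (k : Int) - (cntL s K k : Int) + 1

-- running maxima of a sequence
def pmax (h : Nat → Int) : Nat → Int
  | 0 => h 0
  | k + 1 => max (pmax h k) (h (k + 1))


theorem sorted_getD_mono (s : List Int) (hs : s.Pairwise (· ≤ ·)) (i j : Nat)
    (hij : i ≤ j) (hj : j < s.length) : s.getD i 0 ≤ s.getD j 0 := by
  rcases Nat.lt_or_eq_of_le hij with h | h
  · rw [List.getD_eq_getElem s 0 (by omega), List.getD_eq_getElem s 0 hj]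
    exact List.pairwise_iff_getElem.mp hs i j (by omega) hj h
  · subst h; rfl

theorem cntR_ge (s : List Int) (hs : s.Pairwise (· ≤ ·)) (K : Int) (hK : 0 ≤ K)
    (k : Nat) (hk : k < s.length) : k < cntR s K k := by
  unfold cntR
  by_contra h
  have h3 := (PySem.List.bisectRight_spec s (s.getD k 0 + K) hs).2.2 k hk (by omega)
  rw [List.getD_eq_getElem s 0 hk] at h3
  omega

theorem cntL_le (s : List Int) (hs : s.Pairwise (· ≤ ·)) (K : Int) (hK : 0 ≤ K)
    (k : Nat) (hk : k < s.length) : cntL s K k ≤ k := by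
  unfold cntL
  by_contra h
  have h2 := (PySem.List.bisectLeft_spec s (s.getD k 0 - K) hs).2.1 k hk (by omega)
  rw [List.getD_eq_getElem s 0 hk] at h2
  omega

theorem bisectRight_mono (s : List Int) (hs : s.Pairwise (· ≤ ·)) (x y : Int) (hxy : x ≤ y) :
    PySem.List.bisectRight s x ≤ PySem.List.bisectRight s y := by
  by_contra h
  have hx := PySem.List.bisectRight_spec s x hs
  have hy := PySem.List.bisectRight_spec s y hs
  have hlt : PySem.List.bisectRight s y < s.length := by omega
  have h2 := hx.2.1 _ hlt (by omega)
  have h3 := hy.2.2 _ hlt (le_refl _)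
  omega

theorem bisectLeft_mono (s : List Int) (hs : s.Pairwise (· ≤ ·)) (x y : Int) (hxy : x ≤ y) :
    PySem.List.bisectLeft s x ≤ PySem.List.bisectLeft s y := by
  by_contra h
  have hx := PySem.List.bisectLeft_spec s x hs
  have hy := PySem.List.bisectLeft_spec s y hs
  have hlt : PySem.List.bisectLeft s y < s.length := by omega
  have h2 := hx.2.1 _ (by omega) (by omega)
  have h3 := hy.2.2 _ (by omega) (le_refl _)
  omega

theorem cntR_mono (s : List Int) (hs : s.Pairwise (· ≤ ·)) (K : Int) (i j : Nat)
    (hij : i ≤ j) (hj : j < s.length) : cntR s K i ≤ cntR s K j :=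
  bisectRight_mono s hs _ _ (by have := sorted_getD_mono s hs i j hij hj; omega)

theorem cntL_mono (s : List Int) (hs : s.Pairwise (· ≤ ·)) (K : Int) (i j : Nat)
    (hij : i ≤ j) (hj : j < s.length) : cntL s K i ≤ cntL s K j :=
  bisectLeft_mono s hs _ _ (by have := sorted_getD_mono s hs i j hij hj; omega)

theorem whileJ_eq (s : List Int) (hs : s.Pairwise (· ≤ ·)) (x K : Int) (j : Int)
    (h0 : 0 ≤ j) (hle : j ≤ (PySem.List.bisectRight s (x + K) : Int)) :
    solveWhileJ s x K j = (PySem.List.bisectRight s (x + K) : Int) := by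
  have hspec := PySem.List.bisectRight_spec s (x + K) hs
  rw [solveWhileJ]
  split_ifs with h
  · have hjn : j.toNat < s.length := by omega
    have hget : PySem.List.pyGetD s j 0 = s[j.toNat] := PySem.List.pyGetD_eq_getElem s 0 h0 h.1
    have hjc : j.toNat < PySem.List.bisectRight s (x + K) := by
      by_contra hc
      have := hspec.2.2 j.toNat hjn (by omega)
      rw [hget] at h
      omega
    exact whileJ_eq s hs x K (j + 1) (by omega) (by omega)
  · by_contra hne
    have hjc : j.toNat < PySem.List.bisectRight s (x + K) := by omega
    have hjn : j.toNat < s.length := by omega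
    have h2 := hspec.2.1 j.toNat hjn hjc
    have hget : PySem.List.pyGetD s j 0 = s[j.toNat] :=
      PySem.List.pyGetD_eq_getElem s 0 h0 (by omega)
    rw [not_and_or] at h
    rcases h with h | h
    · omega
    · rw [hget] at h; omega
termination_by ((s.length : Int) - j).toNat
decreasing_by omega

theorem whileI_eq (s : List Int) (hs : s.Pairwise (· ≤ ·)) (x K : Int) (i : Int)
    (hge : (PySem.List.bisectLeft s (x - K) : Int) - 1 ≤ i) (hlt : i < (s.length : Int)) :
    solveWhileI s x K i = (PySem.List.bisectLeft s (x - K) : Int) - 1 := by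
  have hspec := PySem.List.bisectLeft_spec s (x - K) hs
  rw [solveWhileI]
  split_ifs with h
  · have hin : i.toNat < s.length := by omega
    have hget : PySem.List.pyGetD s i 0 = s[i.toNat] :=
      PySem.List.pyGetD_eq_getElem s 0 h.1 (by omega)
    have hic : PySem.List.bisectLeft s (x - K) ≤ i.toNat := by
      by_contra hc
      have := hspec.2.1 i.toNat hin (by omega)
      rw [hget] at h
      omega
    exact whileI_eq s hs x K (i - 1) (by omega) (by omega)
  · by_contra hne
    have hic : (PySem.List.bisectLeft s (x - K) : Int) ≤ i := by omega
    have h0i : 0 ≤ i := by omega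
    have hin : i.toNat < s.length := by omega
    have h2 := hspec.2.2 i.toNat hin (by omega)
    have hget : PySem.List.pyGetD s i 0 = s[i.toNat] :=
      PySem.List.pyGetD_eq_getElem s 0 h0i (by omega)
    rw [not_and_or] at h
    rcases h with h | h
    · omega
    · rw [hget] at h; omega
termination_by (i + 1).toNat
decreasing_by omega

theorem loop1_inv (s : List Int) (hs : s.Pairwise (· ≤ ·)) (K : Int) (hK : 0 ≤ K)
    (m : Nat) (hm : m ≤ s.length) :
    (PySem.List.pyRange 0 (m : Int) 1).foldl
      (fun (st : List Int × Int) i =>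
        let j := solveWhileJ s (PySem.List.pyGetD s i 0) K st.2 - 1
        (PySem.List.pySetD st.1 i (j - i + 1), j))
      (List.replicate s.length (0 : Int), 0)
    = ((List.range m).map (fA s K) ++ List.replicate (s.length - m) 0,
       if m = 0 then 0 else (cntR s K (m - 1) : Int) - 1) := by
  induction m with
  | zero => simp [PySem.List.pyRange_one_eq_nil]
  | succ m ih =>
    have hcast : ((m + 1 : Nat) : Int) = (m : Int) + 1 := by push_cast; ring
    rw [hcast, PySem.List.pyRange_one_succ_right (by positivity), List.foldl_append,
      ih (by omega)]
    have hwhile : solveWhileJ s (PySem.List.pyGetD s (m : Int) 0) K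
        (if m = 0 then 0 else (cntR s K (m - 1) : Int) - 1) = (cntR s K m : Int) := by
      rw [PySem.List.pyGetD_natCast]
      by_cases h0 : m = 0
      · subst h0
        exact whileJ_eq s hs _ K 0 (by omega) (by exact_mod_cast Int.natCast_nonneg _)
      · have hge := cntR_ge s hs K hK (m - 1) (by omega)
        have hmono := cntR_mono s hs K (m - 1) m (by omega) (by omega)
        simp only [if_neg h0]
        unfold cntR
        exact whileJ_eq s hs _ K _ (by unfold cntR at hge; omega)
          (by unfold cntR at hge hmono; push_cast; omega)
    simp only [List.foldl_cons, List.foldl_nil]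
    rw [hwhile]
    simp only [Prod.mk.injEq]
    constructor
    · -- list component
      rw [show ((m : Int) : Int) = ((m : Nat) : Int) from rfl, PySem.List.pySetD_natCast]
      have hlen : ((List.range m).map (fA s K)).length = m := by simp
      rw [List.set_append]
      rw [hlen]
      simp only [lt_irrefl, if_neg (lt_irrefl m), Nat.sub_self]
      have hrep : List.replicate (s.length - m) (0 : Int)
          = 0 :: List.replicate (s.length - (m + 1)) 0 := by
        rw [show s.length - m = (s.length - (m + 1)) + 1 by omega, List.replicate_succ]
      rw [hrep]
      simp [List.range_succ, fA]
      ring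
    · -- j component
      simp only [Nat.add_sub_cancel, if_neg (Nat.succ_ne_zero m)]


theorem loop2_inv (s : List Int) (hs : s.Pairwise (· ≤ ·)) (K : Int) (hK : 0 ≤ K)
    (m : Nat) (hm : m ≤ s.length) :
    (List.range m).foldl
      (fun (st : List Int × Int) (k : Nat) =>
        (fun (st : List Int × Int) (j : Int) =>
          let i := solveWhileI s (PySem.List.pyGetD s j 0) K st.2 + 1
          (PySem.List.pySetD st.1 j (j - i + 1), i)) st ((s.length : Int) - 1 - (k : Int)))
      (List.replicate s.length (0 : Int), (s.length : Int) - 1)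
    = (List.replicate (s.length - m) 0
        ++ (List.range m).map (fun t => gA s K (s.length - m + t)),
       if m = 0 then (s.length : Int) - 1 else (cntL s K (s.length - m) : Int)) := by
  induction m with
  | zero => simp
  | succ m ih =>
    have hn : m + 1 ≤ s.length := hm
    rw [List.range_succ, List.foldl_append, ih (by omega)]
    simp only [List.foldl_cons, List.foldl_nil]
    have hidx : (s.length : Int) - 1 - m = ((s.length - 1 - m : Nat) : Int) := by push_cast; omega
    have hwhile : solveWhileI s (PySem.List.pyGetD s ((s.length : Int) - 1 - m) 0) K
        (if m = 0 then (s.length : Int) - 1 else (cntL s K (s.length - m) : Int))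
        = (cntL s K (s.length - 1 - m) : Int) - 1 := by
      rw [hidx, PySem.List.pyGetD_natCast]
      by_cases h0 : m = 0
      · subst h0
        have hle := cntL_le s hs K hK (s.length - 1) (by omega)
        simp only [if_pos rfl]
        unfold cntL
        rw [show s.length - 1 - 0 = s.length - 1 by omega]
        exact whileI_eq s hs _ K _ (by unfold cntL at hle; push_cast; omega) (by push_cast; omega)
      · have hle := cntL_le s hs K hK (s.length - m) (by omega)
        have hmono := cntL_mono s hs K (s.length - 1 - m) (s.length - m) (by omega) (by omega)
        simp only [if_neg h0]
        unfold cntL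
        exact whileI_eq s hs _ K _
          (by unfold cntL at hmono; push_cast; omega)
          (by unfold cntL at hle; push_cast; omega)
    rw [hwhile]
    simp only [Prod.mk.injEq]
    constructor
    · -- list component
      rw [hidx, PySem.List.pySetD_natCast]
      have hlen : (List.replicate (s.length - m) (0 : Int)).length = s.length - m := by simp
      rw [List.set_append, hlen]
      rw [if_pos (by omega : s.length - 1 - m < s.length - m)]
      have hrep : List.replicate (s.length - m) (0 : Int)
          = List.replicate (s.length - m - 1) 0 ++ [0] := by
        rw [← List.replicate_succ']
        congr 1
        omega
      rw [hrep, List.set_append, List.length_replicate,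
        if_neg (by omega : ¬ (s.length - 1 - m < s.length - m - 1))]
      rw [show s.length - 1 - m - (s.length - m - 1) = 0 by omega]
      have hl : ([(((s.length - 1 - m : Nat) : Int) - ((cntL s K (s.length - 1 - m) : Int) - 1 + 1) + 1)]
            ++ (List.range m).map (fun t => gA s K (s.length - m + t)))
          = (List.range (m + 1)).map (fun t => gA s K (s.length - (m + 1) + t)) := by
        rw [List.range_succ_eq_map, List.map_cons, List.map_map, List.singleton_append]
        congr 1
        · unfold gA
          rw [show s.length - (m + 1) + 0 = s.length - 1 - m by omega]
          ring
        · apply List.map_congr_left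
          intro t ht
          simp only [Function.comp_apply]
          congr 1
          omega
      rw [show ([(0 : Int)].set 0 (((s.length - 1 - m : Nat) : Int) - ((cntL s K (s.length - 1 - m) : Int) - 1 + 1) + 1)) = [(((s.length - 1 - m : Nat) : Int) - ((cntL s K (s.length - 1 - m) : Int) - 1 + 1) + 1)] from rfl]
      rw [← List.range_succ, List.append_assoc, hl]
      rw [show s.length - m - 1 = s.length - (m + 1) by omega]
    · simp only [if_neg (Nat.succ_ne_zero m)]
      rw [show s.length - (m + 1) = s.length - 1 - m by omega]
      omega


theorem pmax_shift (h : Nat → Int) (k : Nat) :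
    pmax h (k + 1) = max (h 0) (pmax (h ∘ Nat.succ) k) := by
  induction k with
  | zero => simp [pmax]
  | succ k ih =>
    simp only [pmax, Function.comp_apply, Nat.succ_eq_add_one] at ih ⊢
    omega

theorem accMaxGo_spec (h : Nat → Int) (c : Int) (m : Nat) :
    solveAccMaxGo c ((List.range m).map h)
      = (List.range m).map (fun k => max c (pmax h k)) := by
  induction m generalizing c h with
  | zero => simp [solveAccMaxGo]
  | succ m ih =>
    rw [List.range_succ_eq_map]
    simp only [List.map_cons, List.map_map]
    rw [solveAccMaxGo, ih]
    congr 1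
    apply List.map_congr_left
    intro a ha
    simp only [Function.comp_apply, Nat.succ_eq_add_one]
    rw [pmax_shift]
    omega

theorem accMax_map_range (h : Nat → Int) (m : Nat) :
    solveAccMax ((List.range m).map h) = (List.range m).map (pmax h) := by
  cases m with
  | zero => simp [solveAccMax]
  | succ m =>
    rw [List.range_succ_eq_map]
    simp only [List.map_cons, List.map_map]
    rw [solveAccMax, accMaxGo_spec]
    congr 1
    apply List.map_congr_left
    intro a ha
    simp only [Function.comp_apply, Nat.succ_eq_add_one]
    rw [pmax_shift]

theorem accMaxGo_length (c : Int) (xs : List Int) :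
    (solveAccMaxGo c xs).length = xs.length := by
  induction xs generalizing c with
  | nil => rfl
  | cons y ys ih => simp [solveAccMaxGo, ih]

theorem accMax_length (xs : List Int) : (solveAccMax xs).length = xs.length := by
  cases xs with
  | nil => rfl
  | cons y ys => simp [solveAccMax, accMaxGo_length]

theorem range_reverse' (n : Nat) :
    (List.range n).reverse = (List.range n).map (fun k => n - 1 - k) := by
  induction n with
  | zero => simp
  | succ n ih =>
    conv_lhs => rw [List.range_succ]
    rw [List.reverse_append, List.reverse_cons, List.reverse_nil, List.nil_append,
      List.singleton_append, ih, List.range_succ_eq_map]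
    simp only [List.map_cons, List.map_map]
    congr 1
    apply List.map_congr_left
    intro a ha
    simp only [Function.comp_apply, Nat.succ_eq_add_one]
    omega

theorem foldl_maxterm_comm (F : Nat → Int) (l : List Nat) (a x : Int) :
    l.foldl (fun r k => max r (F k)) (max a x)
      = max (l.foldl (fun r k => max r (F k)) a) x := by
  induction l generalizing a with
  | nil => rfl
  | cons y t ih =>
    simp only [List.foldl_cons]
    rw [show max (max a x) (F y) = max (max a (F y)) x by omega, ih]

theorem foldl_maxterm_reverse (F : Nat → Int) (l : List Nat) (a : Int) :
    l.reverse.foldl (fun r k => max r (F k)) a = l.foldl (fun r k => max r (F k)) a := by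
  induction l generalizing a with
  | nil => rfl
  | cons y t ih =>
    rw [List.reverse_cons, List.foldl_append, ih]
    simp only [List.foldl_cons, List.foldl_nil]
    rw [← foldl_maxterm_comm]

theorem bloop1_inv (s : List Int) (hs : s.Pairwise (· ≤ ·)) (K : Int) (hK : 0 ≤ K)
    (m : Nat) (hm : m ≤ s.length) :
    (PySem.List.pyRange 0 (m : Int) 1).foldl
      (fun (st : List Int × Int) j =>
        let best := max st.2 (j - (PySem.List.bisectLeft s (PySem.List.pyGetD s j 0 - K) : Int) + 1)
        (st.1 ++ [best], best)) ([], 0)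
    = ((List.range m).map (pmax (gA s K)),
       if m = 0 then 0 else pmax (gA s K) (m - 1)) := by
  induction m with
  | zero => simp [PySem.List.pyRange_one_eq_nil]
  | succ m ih =>
    have hcast : ((m + 1 : Nat) : Int) = (m : Int) + 1 := by push_cast; ring
    rw [hcast, PySem.List.pyRange_one_succ_right (by positivity), List.foldl_append,
      ih (by omega)]
    simp only [List.foldl_cons, List.foldl_nil, PySem.List.pyGetD_natCast]
    have hterm : (m : Int) - (PySem.List.bisectLeft s (s.getD m 0 - K) : Int) + 1 = gA s K m := rfl
    rw [hterm]
    have hbest : max (if m = 0 then 0 else pmax (gA s K) (m - 1)) (gA s K m)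
        = pmax (gA s K) m := by
      by_cases h0 : m = 0
      · subst h0
        have hcl := cntL_le s hs K hK 0 (by omega)
        simp only [if_pos rfl, pmax]
        simp only [gA, cntL] at hcl ⊢
        omega
      · simp only [if_neg h0]
        rw [show m = (m - 1) + 1 by omega, pmax]
        congr 2 <;> omega
    rw [hbest]
    simp only [Prod.mk.injEq]
    refine ⟨?_, by simp⟩
    rw [List.range_succ, List.map_append]
    rfl

theorem bloop2_inv (s : List Int) (hs : s.Pairwise (· ≤ ·)) (K : Int) (hK : 0 ≤ K)
    (m : Nat) (hm : m ≤ s.length - 1) (hn : 2 ≤ s.length) :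
    (List.range m).foldl
      (fun (st : Int × Int) (k : Nat) =>
        (fun (st : Int × Int) (i : Int) =>
          let bestL := max st.2 ((PySem.List.bisectRight s (PySem.List.pyGetD s i 0 + K) : Int) - i)
          (max st.1 (bestL + PySem.List.pyGetD ((List.range s.length).map (pmax (gA s K))) (i - 1) 0), bestL))
          st ((s.length : Int) - 1 - (k : Int)))
      (0, 0)
    = ((List.range m).foldl
        (fun r k => max r (pmax (fun t => fA s K (s.length - 1 - t)) k
          + pmax (gA s K) (s.length - 2 - k))) 0,
       if m = 0 then 0 else pmax (fun t => fA s K (s.length - 1 - t)) (m - 1)) := by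
  induction m with
  | zero => simp
  | succ m ih =>
    rw [List.range_succ, List.foldl_append, List.foldl_append, ih (by omega)]
    simp only [List.foldl_cons, List.foldl_nil]
    have hidx : (s.length : Int) - 1 - (m : Int) = ((s.length - 1 - m : Nat) : Int) := by
      push_cast; omega
    rw [hidx, PySem.List.pyGetD_natCast]
    have hterm : (PySem.List.bisectRight s (s.getD (s.length - 1 - m) 0 + K) : Int)
        - ((s.length - 1 - m : Nat) : Int) = fA s K (s.length - 1 - m) := rfl
    rw [hterm]
    have hbest : max (if m = 0 then 0 else pmax (fun t => fA s K (s.length - 1 - t)) (m - 1))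
        (fA s K (s.length - 1 - m)) = pmax (fun t => fA s K (s.length - 1 - t)) m := by
      by_cases h0 : m = 0
      · subst h0
        have hcg := cntR_ge s hs K hK (s.length - 1) (by omega)
        simp only [if_pos rfl, pmax, Nat.sub_zero]
        simp only [fA, cntR] at hcg ⊢
        omega
      · simp only [if_neg h0]
        rw [show m = (m - 1) + 1 by omega, pmax]
        congr 2 <;> omega
    rw [hbest]
    have hpidx : ((s.length - 1 - m : Nat) : Int) - 1 = ((s.length - 2 - m : Nat) : Int) := by
      push_cast; omega
    rw [hpidx, PySem.List.pyGetD_natCast,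
      PySem.List.getD_map_range (pmax (gA s K)) s.length (s.length - 2 - m) 0 (by omega)]
    simp only [Prod.mk.injEq]
    constructor <;> simp


theorem loop1_len (s : List Int) (K : Int) (L : List Int) (st : List Int × Int) :
    ((L.foldl (fun (st : List Int × Int) i =>
      let j := solveWhileJ s (PySem.List.pyGetD s i 0) K st.2 - 1
      (PySem.List.pySetD st.1 i (j - i + 1), j)) st).1).length = st.1.length := by
  induction L generalizing st with
  | nil => rfl
  | cons x t ih =>
    simp only [List.foldl_cons]
    rw [ih]
    simp [PySem.List.length_pySetD]

theorem final_bridge (F G : Nat → Int) (M : Nat) (hFG : ∀ k < M, F k = G (M - 1 - k)) :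
    (List.range M).foldl (fun r k => max r (F k)) 0
      = (List.range M).foldl (fun r k => max r (G k)) 0 := by
  rw [PySem.List.foldl_congr_mem (List.range M) _ (fun r k => max r (G (M - 1 - k))) 0
    (by intro acc x hx; rw [hFG x (List.mem_range.mp hx)])]
  have h2 : (List.range M).foldl (fun r k => max r (G (M - 1 - k))) 0
      = ((List.range M).map (fun k => M - 1 - k)).foldl (fun r j => max r (G j)) 0 := by
    rw [List.foldl_map]
  rw [h2, ← range_reverse', foldl_maxterm_reverse]

-- ===== VERDICT (by name: the statement is the Claim_ definition above) =====
theorem solve_spec : Claim_equal_solve := by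
  intro inp hdom hpre
  unfold Spec_solve
  unfold Pre_solve at hpre
  simp only [solve, solve_alt]
  set s := PySem.List.sorted inp.1 (fun y => y) with hsdef
  have hs : s.Pairwise (· ≤ ·) := PySem.List.sorted_pairwise inp.1 (fun y => y)
  have hslen : s.length = inp.1.length := PySem.List.length_sorted inp.1 (fun y => y) false
  by_cases hn2 : s.length ≤ 1
  · -- degenerate: both final loops are over an empty range, both sides are 0
    have hl2len : ((solveAccMax
        ((List.foldl (fun (st : List Int × Int) i =>
          let j := solveWhileJ s (PySem.List.pyGetD s i 0) inp.2 st.2 - 1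
          (PySem.List.pySetD st.1 i (j - i + 1), j))
          (List.replicate s.length 0, 0) (PySem.List.pyRange 0 (s.length : Int))).1.reverse)).reverse).length
        = s.length := by
      rw [List.length_reverse, accMax_length, List.length_reverse, loop1_len]
      simp
    rw [hl2len]
    rw [PySem.List.pyRange_one_eq_nil (by omega : (s.length : Int) - 1 ≤ 0),
      PySem.List.pyRange_neg_one_eq_nil (by omega : (s.length : Int) - 1 ≤ 0)]
    rfl
  · -- main case: at least two elements, hence K ≥ 0
    have hK : 0 ≤ inp.2 := by omega
    have hn2' : 2 ≤ s.length := by omega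
    -- A first loop
    rw [loop1_inv s hs inp.2 hK s.length (le_refl _)]
    -- A second loop
    rw [PySem.List.pyRange_neg_one ((s.length : Int) - 1) (-1),
      show ((s.length : Int) - 1 - (-1)).toNat = s.length by omega, List.foldl_map]
    rw [loop2_inv s hs inp.2 hK s.length (le_refl _)]
    -- simplify the two characterised arrays
    simp only [Nat.sub_self, List.replicate_zero, List.append_nil, List.nil_append,
      Nat.zero_add, List.map_map]
    -- characterise l2 and r2
    rw [← List.map_reverse, range_reverse', List.map_map]
    rw [show (fA s inp.2 ∘ fun k => s.length - 1 - k)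
        = (fun k => fA s inp.2 (s.length - 1 - k)) from rfl]
    rw [accMax_map_range (fun k => fA s inp.2 (s.length - 1 - k)) s.length]
    rw [← List.map_reverse, range_reverse', List.map_map]
    rw [show (pmax (fun k => fA s inp.2 (s.length - 1 - k)) ∘ fun k => s.length - 1 - k)
        = (fun k => pmax (fun t => fA s inp.2 (s.length - 1 - t)) (s.length - 1 - k)) from rfl]
    rw [accMax_map_range (gA s inp.2) s.length]
    simp only [List.length_map, List.length_range]
    -- A final loop over range (n-1)
    rw [PySem.List.pyRange_one 0 ((s.length : Int) - 1),
      show ((s.length : Int) - 1 - 0).toNat = s.length - 1 by omega, List.foldl_map]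
    refine Eq.trans (PySem.List.foldl_congr_mem _ _
      (fun res k => max res (pmax (fun t => fA s inp.2 (s.length - 1 - t)) (s.length - 2 - k)
        + pmax (gA s inp.2) k)) 0 ?_) ?_
    · intro acc x hx
      have hxlt : x < s.length - 1 := List.mem_range.mp hx
      rw [show (0 : Int) + (x : Int) + 1 = ((x + 1 : Nat) : Int) by push_cast; ring,
        show (0 : Int) + (x : Int) = ((x : Nat) : Int) by push_cast; ring,
        PySem.List.pyGetD_natCast, PySem.List.pyGetD_natCast,
        PySem.List.getD_map_range _ _ _ _ (by omega),
        PySem.List.getD_map_range _ _ _ _ (by omega),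
        show s.length - 1 - (x + 1) = s.length - 2 - x by omega]
    · -- B side
      rw [bloop1_inv s hs inp.2 hK s.length (le_refl _)]
      simp only []
      rw [PySem.List.pyRange_neg_one ((s.length : Int) - 1) 0,
        show ((s.length : Int) - 1 - 0).toNat = s.length - 1 by omega, List.foldl_map]
      rw [bloop2_inv s hs inp.2 hK (s.length - 1) (le_refl _) hn2']
      simp only []
      refine final_bridge _ _ (s.length - 1) ?_
      intro k hk
      rw [show s.length - 1 - 1 - k = s.length - 2 - k by omega,
        show s.length - 2 - (s.length - 2 - k) = k by omega]
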